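-- pv_equiv track=rewrite | github.com/mihoubmessaoud-dotcom/SEC_SYSTEM3_ENHANCED | backups/full_app_backup_20260318_052826/modules/institutional/exception_registry.py | _consecutive_tail
-- ===== SOURCE A (Python) =====
-- from typing import Dict, List, Optional
--
-- def _consecutive_tail(years: List[int], year: int) -> int:
--     if not years:
--         return 0
--     s = set(years)
--     k = 0
--     cur = year
--     while cur in s:
--         k += 1
--         cur -= 1
--     return k
-- ===== SOURCE B (Python) =====
-- def _consecutive_tail(years, year):
--     if not years:
--         return 0
--     present = sorted({y for y in years if y <= year}, reverse=True)
--     k = 0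
--     expected = year
--     for y in present:
--         if y == expected:
--             k += 1
--             expected -= 1
--         elif y < expected:
--             break
--     return k
-- ===== Notes on version B (the rewrite author's own statement) =====
-- stated objective: alternative
-- what changed: Replaces the while-loop that probes the set for year, year-1, ... with a sort of the distinct years <= year in descending order followed by a single linear scan that counts the consecutive run and stops at the first gap.
import Mathlib
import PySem

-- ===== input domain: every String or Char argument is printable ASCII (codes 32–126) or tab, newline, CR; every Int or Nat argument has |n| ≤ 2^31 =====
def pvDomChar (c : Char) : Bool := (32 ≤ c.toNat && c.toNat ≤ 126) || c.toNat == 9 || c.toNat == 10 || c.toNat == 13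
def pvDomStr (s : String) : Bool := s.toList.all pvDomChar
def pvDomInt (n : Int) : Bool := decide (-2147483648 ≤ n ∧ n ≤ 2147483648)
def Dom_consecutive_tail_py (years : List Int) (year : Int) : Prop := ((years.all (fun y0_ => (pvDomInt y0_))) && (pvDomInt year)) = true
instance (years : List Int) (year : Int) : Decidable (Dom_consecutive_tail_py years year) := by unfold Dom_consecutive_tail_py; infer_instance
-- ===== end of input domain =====

-- B replaces A's downward set-membership probe with sorting the distinct years ≤ year
-- descending and counting the consecutive run in one scan (objective: alternative).


-- ===== PORT A =====
-- termination helper for the while loop: when cur ∈ s, the number of elements of s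
-- that are ≤ cur strictly drops as cur decreases
theorem pvA_measure_lt (s : List Int) (cur : Int) (h : cur ∈ s) :
    (s.filter (fun z => decide (z ≤ cur - 1))).length <
      (s.filter (fun z => decide (z ≤ cur))).length := by
  have hsub : s.filter (fun z => decide (z ≤ cur - 1)) =
      (s.filter (fun z => decide (z ≤ cur))).filter (fun z => decide (z ≤ cur - 1)) := by
    rw [List.filter_filter]
    apply List.filter_congr
    intro x _
    by_cases h1 : x ≤ cur - 1
    · have h2 : x ≤ cur := by omega
      simp [h1, h2]
    · simp [h1]
  rw [hsub]
  exact List.length_filter_lt_length_iff_exists.mpr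
    ⟨cur, List.mem_filter.mpr ⟨h, by simp⟩, by simp⟩

-- the 'while cur in s: k += 1; cur -= 1' loop
def loopA (s : List Int) (cur : Int) (k : Int) : Int :=
  if h : cur ∈ s then loopA s (cur - 1) (k + 1) else k
termination_by (s.filter (fun z => decide (z ≤ cur))).length
decreasing_by exact pvA_measure_lt s cur h

def consecutive_tail_py (years : List Int) (year : Int) : Int :=
  if years = [] then 0
  else
    let s := PySem.Set.ofList years
    loopA s year 0

-- ===== PORT B =====
-- the for-loop with early break over the descending list
def scanB (l : List Int) (expected : Int) (k : Int) : Int :=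
  match l with
  | [] => k
  | y :: t =>
    if y = expected then scanB t (expected - 1) (k + 1)
    else if y < expected then k
    else scanB t expected k

def consecutive_tail_py_alt (years : List Int) (year : Int) : Int :=
  if years = [] then 0
  else
    let present := PySem.List.sorted (PySem.Set.ofList (years.filter (fun y => decide (y ≤ year)))) (fun x => x) true
    scanB present year 0

-- ===== PRECONDITION & SPEC =====
def Spec_consecutive_tail_py (years : List Int) (year : Int) (out : Int) : Prop := out = consecutive_tail_py_alt years year
instance (years : List Int) (year : Int) (out : Int) : Decidable (Spec_consecutive_tail_py years year out) := by unfold Spec_consecutive_tail_py; infer_instance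

-- ===== CLAIM (what is proved, stated in full; the proofs are below) =====
def Claim_equal_consecutive_tail_py : Prop := ∀ (years : List Int) (year : Int), Dom_consecutive_tail_py years year → Spec_consecutive_tail_py years year (consecutive_tail_py years year)

-- ===== LEMMAS AND PROOFS =====

-- main bridge: scanning a strictly descending list whose members are exactly the
-- elements of s that are ≤ expected computes A's probing loop
theorem scanB_eq_loopA (l : List Int) :
    ∀ (s : List Int) (expected k : Int),
      l.Pairwise (fun a b => b < a) →
      (∀ z, z ∈ l ↔ z ∈ s ∧ z ≤ expected) →
      scanB l expected k = loopA s expected k := by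
  induction l with
  | nil =>
    intro s expected k _ hmem
    have hnot : expected ∉ s := fun hs => by
      have := (hmem expected).mpr ⟨hs, le_refl _⟩
      simp at this
    rw [scanB, loopA]
    simp [hnot]
  | cons y t ih =>
    intro s expected k hpw hmem
    have hy := (hmem y).mp (List.mem_cons_self)
    have hylt : y ≤ expected := hy.2
    have hpw' := List.pairwise_cons.mp hpw
    by_cases hye : y = expected
    · subst hye
      have hsy : y ∈ s := hy.1
      rw [scanB, loopA]
      simp only [dif_pos hsy]
      apply ih s (y - 1) (k + 1) hpw'.2
      intro z
      constructor
      · intro hz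
        have hzl := (hmem z).mp (List.mem_cons_of_mem _ hz)
        exact ⟨hzl.1, by have := hpw'.1 z hz; omega⟩
      · intro ⟨hzs, hzle⟩
        have : z ∈ y :: t := (hmem z).mpr ⟨hzs, by omega⟩
        rcases List.mem_cons.mp this with rfl | h
        · omega
        · exact h
    · have hylt' : y < expected := lt_of_le_of_ne hylt hye
      have hnot : expected ∉ s := by
        intro hs
        have : expected ∈ y :: t := (hmem expected).mpr ⟨hs, le_refl _⟩
        rcases List.mem_cons.mp this with h | h
        · omega
        · have := hpw'.1 expected h; omega
      rw [scanB, loopA]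
      simp [hye, hylt', hnot]

theorem consecutive_tail_py_eq (years : List Int) (year : Int) :
    consecutive_tail_py years year = consecutive_tail_py_alt years year := by
  unfold consecutive_tail_py consecutive_tail_py_alt
  by_cases h : years = []
  · simp [h]
  · simp only [if_neg h]
    set present := PySem.List.sorted (PySem.Set.ofList (years.filter (fun y => decide (y ≤ year)))) (fun x => x) true with hp
    have hdesc : present.Pairwise (fun a b => b < a) := by
      have hge : present.Pairwise (fun a b => (fun x : Int => x) b ≤ (fun x : Int => x) a) :=
        PySem.List.sorted_pairwise_rev _ _
      have hnd : present.Nodup :=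
        (PySem.List.sorted_perm _ _ _).nodup_iff.mpr
          (PySem.Set.nodup_ofList _)
      have hne : present.Pairwise (fun a b => a ≠ b) := hnd
      exact (hge.and hne).imp (fun ⟨h1, h2⟩ => lt_of_le_of_ne h1 (Ne.symm h2))
    refine (scanB_eq_loopA present (PySem.Set.ofList years) year 0 hdesc ?_).symm
    intro z
    rw [hp, PySem.List.mem_sorted, PySem.Set.mem_ofList, PySem.Set.mem_ofList,
      List.mem_filter]
    simp

-- ===== VERDICT (by name: the statement is the Claim_ definition above) =====
theorem consecutive_tail_py_spec : Claim_equal_consecutive_tail_py := by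
  intro years year _
  unfold Spec_consecutive_tail_py
  exact consecutive_tail_py_eq years year
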